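-- pv_equiv track=rewrite | github.com/FragileTech/fragile | src/fragile/physics/app/correlator_plots.py | group_electroweak_correlator_keys
-- ===== SOURCE A (Python) =====
-- _EW_GROUP_ORDER = [
--     "U(1)", "SU(2) Base", "SU(2) Directed", "SU(2) Walker-Type",
--     "EW Mixed", "Symmetry Breaking", "Parity Velocity",
-- ]
--
-- def group_electroweak_correlator_keys(keys) -> dict[str, list[str]]:
--     """Group electroweak correlator keys by family.
--
--     Returns an ordered dict of ``{display_name: [key, ...]}``.
--     """
--     _rules = [
--         ("U(1)", lambda k: k.startswith("u1_")),
--         ("SU(2) Directed", lambda k: k.startswith("su2_") and k.endswith("_directed")),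
--         (
--             "SU(2) Walker-Type",
--             lambda k: k.startswith("su2_")
--             and any(k.endswith(s) for s in ("_cloner", "_resister", "_persister")),
--         ),
--         ("SU(2) Base", lambda k: k.startswith("su2_")),
--         ("EW Mixed", lambda k: k == "ew_mixed"),
--         ("Symmetry Breaking", lambda k: k in ("fitness_phase", "clone_indicator")),
--         ("Parity Velocity", lambda k: k.startswith("velocity_norm_")),
--     ]
--     groups: dict[str, list[str]] = {}
--     for key in keys:
--         matched = False
--         for group_name, predicate in _rules:
--             if predicate(key):
--                 groups.setdefault(group_name, []).append(key)
--                 matched = True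
--                 break
--         if not matched:
--             groups.setdefault("Other", []).append(key)
--
--     ordered: dict[str, list[str]] = {}
--     for name in _EW_GROUP_ORDER:
--         if name in groups:
--             ordered[name] = sorted(groups.pop(name))
--     for name in sorted(groups):
--         ordered[name] = sorted(groups[name])
--     return ordered
-- ===== SOURCE B (Python) =====
-- _EW_GROUP_ORDER = [
--     "U(1)", "SU(2) Base", "SU(2) Directed", "SU(2) Walker-Type",
--     "EW Mixed", "Symmetry Breaking", "Parity Velocity",
-- ]
--
--
-- def _classify(k):
--     if k.startswith("u1_"):
--         return "U(1)"
--     if k.startswith("su2_") and k.endswith("_directed"):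
--         return "SU(2) Directed"
--     if k.startswith("su2_") and (
--         k.endswith("_cloner") or k.endswith("_resister") or k.endswith("_persister")
--     ):
--         return "SU(2) Walker-Type"
--     if k.startswith("su2_"):
--         return "SU(2) Base"
--     if k == "ew_mixed":
--         return "EW Mixed"
--     if k in ("fitness_phase", "clone_indicator"):
--         return "Symmetry Breaking"
--     if k.startswith("velocity_norm_"):
--         return "Parity Velocity"
--     return "Other"
--
--
-- def group_electroweak_correlator_keys(keys) -> dict[str, list[str]]:
--     """Group electroweak correlator keys by family (one global sort, per-name filters)."""
--     labeled = [(_classify(k), k) for k in sorted(keys)]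
--     present = {g for g, _ in labeled}
--     names = [n for n in _EW_GROUP_ORDER if n in present]
--     names += sorted(present - set(_EW_GROUP_ORDER))
--     return {n: [k for g, k in labeled if g == n] for n in names}
-- ===== Notes on version B (the rewrite author's own statement) =====
-- stated objective: alternative
-- what changed: B sorts the whole key list once up front and classifies each key with an if-chain into per-family filters of that sorted list, building the output directly as ordered (name, bucket) pairs, instead of A's incremental dict bucketing with setdefault/pop and seven-plus per-bucket sorts.
import Mathlib
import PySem

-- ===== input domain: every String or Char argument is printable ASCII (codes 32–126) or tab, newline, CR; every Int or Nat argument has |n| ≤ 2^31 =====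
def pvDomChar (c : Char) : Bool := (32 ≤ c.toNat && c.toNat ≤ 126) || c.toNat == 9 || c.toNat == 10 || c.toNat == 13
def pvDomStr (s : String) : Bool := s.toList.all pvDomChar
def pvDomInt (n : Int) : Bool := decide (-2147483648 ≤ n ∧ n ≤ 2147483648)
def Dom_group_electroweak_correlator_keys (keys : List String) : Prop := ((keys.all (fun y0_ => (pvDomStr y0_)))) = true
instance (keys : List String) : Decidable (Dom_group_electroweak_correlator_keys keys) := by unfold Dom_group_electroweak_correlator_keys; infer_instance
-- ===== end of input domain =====

-- B replaces A's per-key first-match bucketing into a dict (with seven-plus per-bucket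
-- sorts) by one global sort up front followed by per-family filters; same return value.

-- ===== PORT A =====
def ewGroupOrder : List String :=
  ["U(1)", "SU(2) Base", "SU(2) Directed", "SU(2) Walker-Type",
   "EW Mixed", "Symmetry Breaking", "Parity Velocity"]

def ewRules : List (String × (String → Bool)) :=
  [("U(1)", fun k => PySem.Str.startswith k "u1_"),
   ("SU(2) Directed", fun k => PySem.Str.startswith k "su2_" && PySem.Str.endswith k "_directed"),
   ("SU(2) Walker-Type", fun k => PySem.Str.startswith k "su2_" &&
      (["_cloner", "_resister", "_persister"].any (fun s => PySem.Str.endswith k s))),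
   ("SU(2) Base", fun k => PySem.Str.startswith k "su2_"),
   ("EW Mixed", fun k => k == "ew_mixed"),
   ("Symmetry Breaking", fun k => k == "fitness_phase" || k == "clone_indicator"),
   ("Parity Velocity", fun k => PySem.Str.startswith k "velocity_norm_")]

-- the inner "for group_name, predicate in _rules: if predicate(key): …; break" loop
def ewFindRule : List (String × (String → Bool)) → String → Option String
  | [], _ => none
  | (n, p) :: rest, k => if p k then some n else ewFindRule rest k

-- one iteration of "for name in _EW_GROUP_ORDER: if name in groups: ordered[name] = sorted(groups.pop(name))"
def ewStep (st : PySem.Dict String (List String) × PySem.Dict String (List String)) (name : String) :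
    PySem.Dict String (List String) × PySem.Dict String (List String) :=
  if st.2.contains name then
    match st.2.pop? name with
    | some (b, g) => (st.1.insert name (PySem.List.sorted b (fun x => x)), g)
    | none => st
  else st

def group_electroweak_correlator_keys (keys : List String) : List (String × List String) :=
  let groups : PySem.Dict String (List String) :=
    keys.foldl (fun d key =>
      match ewFindRule ewRules key with
      | some name => d.modify name [] (· ++ [key])   -- groups.setdefault(group_name, []).append(key)
      | none => d.modify "Other" [] (· ++ [key])) PySem.Dict.empty
  let st := ewGroupOrder.foldl ewStep (PySem.Dict.empty, groups)
  let ordered :=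
    (PySem.List.sorted st.2.keys (fun x => x)).foldl
      (fun o name => o.insert name (PySem.List.sorted (st.2.getD name []) (fun x => x))) st.1
  ordered.items

-- ===== PORT B =====
def ewClassify (k : String) : String :=
  if PySem.Str.startswith k "u1_" then "U(1)"
  else if PySem.Str.startswith k "su2_" && PySem.Str.endswith k "_directed" then "SU(2) Directed"
  else if PySem.Str.startswith k "su2_" &&
      (PySem.Str.endswith k "_cloner" || PySem.Str.endswith k "_resister" || PySem.Str.endswith k "_persister") then
    "SU(2) Walker-Type"
  else if PySem.Str.startswith k "su2_" then "SU(2) Base"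
  else if k == "ew_mixed" then "EW Mixed"
  else if k == "fitness_phase" || k == "clone_indicator" then "Symmetry Breaking"
  else if PySem.Str.startswith k "velocity_norm_" then "Parity Velocity"
  else "Other"

def group_electroweak_correlator_keys_alt (keys : List String) : List (String × List String) :=
  let labeled := (PySem.List.sorted keys (fun x => x)).map (fun k => (ewClassify k, k))
  let present : PySem.Set String := PySem.Set.ofList (labeled.map (fun p => p.1))
  let names := ewGroupOrder.filter (fun n => present.contains n) ++
    PySem.List.sorted (present.filter (fun n => !(ewGroupOrder.contains n))) (fun x => x)
  -- the names are pairwise distinct, so the Python dict comprehension is this association list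
  names.map (fun n => (n, (labeled.filter (fun p => p.1 == n)).map (fun p => p.2)))

-- ===== PRECONDITION & SPEC =====
def Spec_group_electroweak_correlator_keys (keys : List String) (out : List (String × List String)) : Prop := out = group_electroweak_correlator_keys_alt keys
instance (keys : List String) (out : List (String × List String)) : Decidable (Spec_group_electroweak_correlator_keys keys out) := by unfold Spec_group_electroweak_correlator_keys; infer_instance

-- ===== CLAIM (what is proved, stated in full; the proofs are below) =====
def Claim_equal_group_electroweak_correlator_keys : Prop := ∀ (keys : List String), Dom_group_electroweak_correlator_keys keys → Spec_group_electroweak_correlator_keys keys (group_electroweak_correlator_keys keys)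

-- ===== LEMMAS AND PROOFS =====

-- A's first-match rule scan computes the same family name as B's if-chain
theorem ewFindRule_eq (k : String) : (ewFindRule ewRules k).getD "Other" = ewClassify k := by
  simp only [ewRules, ewFindRule, ewClassify, List.any_cons, List.any_nil, Bool.or_false]
  split_ifs <;> simp_all

theorem ewStepA_eq (d : PySem.Dict String (List String)) (k : String) :
    (match ewFindRule ewRules k with
     | some name => d.modify name [] (· ++ [k])
     | none => d.modify "Other" [] (· ++ [k])) = d.modify (ewClassify k) [] (· ++ [k]) := by
  cases h : ewFindRule ewRules k <;> simp [← ewFindRule_eq k, h]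

theorem find?_filter_ne {ν : Type} (l : List (String × ν)) (k k' : String) (h : k' ≠ k) :
    List.find? (fun p => p.1 == k') (List.filter (fun p => !p.1 == k) l) =
      List.find? (fun p => p.1 == k') l := by
  induction l with
  | nil => rfl
  | cons p l ih =>
    by_cases hp : p.1 = k
    · have hne : (p.1 == k') = false := by
        simp only [beq_eq_false_iff_ne, hp]
        exact fun hh => h hh.symm
      simp [hp, ih, Ne.symm h]
    · by_cases hq : p.1 = k' <;>
        simp [hp, hq, ih, h, beq_eq_false_iff_ne]

theorem dict_get?_erase_of_ne {ν : Type} (d : PySem.Dict String ν) (k k' : String) (h : k' ≠ k) :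
    (d.erase k).get? k' = d.get? k' := by
  simp [PySem.Dict.erase, PySem.Dict.get?, find?_filter_ne d.items k k' h]

theorem dict_keys_erase {ν : Type} (d : PySem.Dict String ν) (k : String) :
    (d.erase k).keys = d.keys.filter (fun n => !(n == k)) := by
  simp [PySem.Dict.erase, PySem.Dict.keys, List.filter_map]
  rfl

theorem dict_pop?_of_contains {ν : Type} (d : PySem.Dict String ν) (k : String)
    (h : d.contains k = true) (dflt : ν) :
    d.pop? k = some (d.getD k dflt, d.erase k) := by
  rcases hh : d.get? k with _ | w
  · rw [PySem.Dict.get?_eq_none_iff_contains] at hh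
    simp [hh] at h
  · simp [PySem.Dict.pop?, hh, PySem.Dict.getD_eq_get?_getD]

theorem orderFold (L : List String) (od gr : PySem.Dict String (List String))
    (hnd : gr.keys.Nodup) (hL : L.Nodup) (hfresh : ∀ n ∈ L, od.contains n = false) :
    (L.foldl ewStep (od, gr)).1.items =
        od.items ++ (L.filter (fun n => gr.contains n)).map
          (fun n => (n, PySem.List.sorted (gr.getD n []) (fun x => x)))
      ∧ (∀ n, n ∉ L → (L.foldl ewStep (od, gr)).2.get? n = gr.get? n)
      ∧ (L.foldl ewStep (od, gr)).2.keys = gr.keys.filter (fun n => !(L.contains n)) := by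
  induction L generalizing od gr with
  | nil => simp
  | cons m L ih =>
    have hLnd := (List.nodup_cons.mp hL).2
    have hmL : m ∉ L := (List.nodup_cons.mp hL).1
    by_cases hc : gr.contains m = true
    · have hstep : ewStep (od, gr) m =
          (od.insert m (PySem.List.sorted (gr.getD m []) (fun x => x)), gr.erase m) := by
        simp [ewStep, hc, dict_pop?_of_contains gr m hc []]
      have hernd : (gr.erase m).keys.Nodup := by
        rw [dict_keys_erase]; exact hnd.filter _
      have hfresh' : ∀ n ∈ L, (od.insert m (PySem.List.sorted (gr.getD m []) (fun x => x))).contains n = false := by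
        intro n hn
        rw [PySem.Dict.contains_insert]
        have h1 : (n == m) = false := beq_eq_false_iff_ne.mpr (fun e => hmL (e ▸ hn))
        simp [h1, hfresh n (List.mem_cons_of_mem _ hn)]
      obtain ⟨h1, h2, h3⟩ := ih (od.insert m (PySem.List.sorted (gr.getD m []) (fun x => x))) (gr.erase m) hernd hLnd hfresh'
      refine ⟨?_, ?_, ?_⟩
      · rw [List.foldl_cons, hstep, h1,
          PySem.Dict.items_insert_of_not_contains _ _ (hfresh m (List.mem_cons_self)),
          List.filter_cons_of_pos (by simp [hc]), List.map_cons, List.append_assoc]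
        congr 1
        rw [List.singleton_append]
        congr 1
        have hf : List.filter (fun n => (gr.erase m).contains n) L = List.filter (fun n => gr.contains n) L := by
          apply List.filter_congr
          intro n hn
          have hnm : n ≠ m := fun e => hmL (e ▸ hn)
          rw [PySem.Dict.contains_eq_isSome_get?, PySem.Dict.contains_eq_isSome_get?,
            dict_get?_erase_of_ne _ _ _ hnm]
        rw [hf]
        apply List.map_congr_left
        intro n hn
        have hnm : n ≠ m := fun e => hmL (e ▸ (List.mem_filter.mp hn).1)
        rw [PySem.Dict.getD_eq_get?_getD, dict_get?_erase_of_ne _ _ _ hnm,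
          ← PySem.Dict.getD_eq_get?_getD]
      · intro n hn
        have hnm : n ≠ m := fun e => hn (e ▸ List.mem_cons_self)
        rw [List.foldl_cons, hstep, h2 n (fun h => hn (List.mem_cons_of_mem _ h)),
          dict_get?_erase_of_ne _ _ _ hnm]
      · rw [List.foldl_cons, hstep, h3, dict_keys_erase]
        rw [List.filter_filter]
        apply List.filter_congr
        intro n hn
        cases h1 : (n == m)
        · have hne : n ≠ m := beq_eq_false_iff_ne.mp h1
          cases h2 : L.contains n <;> simp_all
        · cases h2 : L.contains n <;> simp_all
    · have hstep : ewStep (od, gr) m = (od, gr) := by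
        simp [ewStep, hc]
      obtain ⟨h1, h2, h3⟩ := ih od gr hnd hLnd (fun n hn => hfresh n (List.mem_cons_of_mem _ hn))
      have hc' : gr.contains m = false := by simpa using hc
      refine ⟨?_, ?_, ?_⟩
      · rw [List.foldl_cons, hstep, h1, List.filter_cons_of_neg (by simp [hc'])]
      · intro n hn
        rw [List.foldl_cons, hstep, h2 n (fun h => hn (List.mem_cons_of_mem _ h))]
      · rw [List.foldl_cons, hstep, h3]
        apply List.filter_congr
        intro n hn
        have hm : m ∉ gr.keys := by
          have h5 := hc'
          rw [PySem.Dict.contains_eq_decide_mem_keys] at h5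
          simpa using h5
        have hnm : n ≠ m := fun e => hm (e ▸ hn)
        simp
        exact fun _ => hnm


theorem filter_sorted (xs : List String) (p : String → Bool) :
    PySem.List.sorted (xs.filter p) (fun x => x) = (PySem.List.sorted xs (fun x => x)).filter p := by
  apply PySem.List.sorted_id_eq_of_perm_of_pairwise
  · exact (PySem.List.sorted_perm xs (fun x => x) false).filter p
  · exact (PySem.List.sorted_pairwise xs (fun x => x)).filter p

set_option maxHeartbeats 1000000 in
theorem group_electroweak_correlator_keys_spec' (keys : List String) :
    group_electroweak_correlator_keys keys = group_electroweak_correlator_keys_alt keys := by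
  unfold group_electroweak_correlator_keys group_electroweak_correlator_keys_alt
  have hfun : (fun (d : PySem.Dict String (List String)) (key : String) =>
      match ewFindRule ewRules key with
      | some name => d.modify name [] (· ++ [key])
      | none => d.modify "Other" [] (· ++ [key])) =
      (fun d k => d.modify (ewClassify k) [] (· ++ [k])) := funext₂ ewStepA_eq
  rw [hfun]
  set c := ewClassify with hc
  set G := keys.foldl (fun d k => d.modify (c k) [] (· ++ [k])) PySem.Dict.empty with hGdef
  set S := PySem.List.sorted keys (fun x => x) with hSdef
  have hGD : ∀ n, G.getD n [] = keys.filter (fun k => c k == n) := by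
    intro n
    rw [hGdef, ← List.foldl_map (f := fun k => (c k, k))
      (g := fun (d : PySem.Dict String (List String)) p => d.modify p.1 [] (· ++ [p.2])),
      PySem.Dict.getD_foldl_modify_append]
    simp [List.filter_map, Function.comp_def, List.map_map]
  have hGkeys : G.keys = PySem.Set.ofList (keys.map c) := by
    rw [hGdef, PySem.Dict.keys_foldl_modify_key keys c [] (fun d x v => v ++ [x])]
    simp [PySem.Dict.keys_empty]
    rfl
  have hGnodup : G.keys.Nodup := by
    rw [hGkeys]; exact PySem.Set.nodup_ofList _
  obtain ⟨h1, h2, h3⟩ := orderFold ewGroupOrder PySem.Dict.empty G hGnodup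
    (by decide) (fun n _ => PySem.Dict.contains_empty n)
  set st := ewGroupOrder.foldl ewStep (PySem.Dict.empty, G) with hst
  have hkeys2 : st.2.keys = G.keys.filter (fun n => !(ewGroupOrder.contains n)) := h3
  have hnd2 : st.2.keys.Nodup := by rw [hkeys2]; exact hGnodup.filter _
  set names2 := PySem.List.sorted st.2.keys (fun x => x) with hn2
  have hmem2 : ∀ n ∈ names2, n ∉ ewGroupOrder := by
    intro n hn
    have hk : n ∈ st.2.keys := (PySem.List.sorted_perm st.2.keys (fun x => x) false).mem_iff.mp hn
    rw [hkeys2] at hk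
    have hk2 := (List.mem_filter.mp hk).2
    simpa using hk2
  have hnodup2 : names2.Nodup :=
    (PySem.List.sorted_perm st.2.keys (fun x => x) false).nodup_iff.mpr hnd2
  have hfr2 : ∀ n ∈ names2, st.1.contains n = false := by
    intro n hn
    rw [PySem.Dict.contains_eq_decide_mem_keys]
    have hk : st.1.keys = (List.filter (fun n => G.contains n) ewGroupOrder).map (fun n => n) := by
      show st.1.items.map (fun p => p.1) = _
      rw [h1]
      simp [show PySem.Dict.empty.items = ([] : List (String × List String)) from rfl,
        List.map_map, Function.comp_def]
    have hnk : n ∉ st.1.keys := by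
      rw [hk]
      intro hmem
      rcases List.mem_map.mp hmem with ⟨m, hm, rfl⟩
      exact hmem2 _ hn (List.mem_of_mem_filter hm)
    simp [hnk]
  rw [PySem.Dict.items_foldl_insert_fresh names2 (fun n => n)
    (fun n => PySem.List.sorted (st.2.getD n []) (fun x => x)) st.1 hfr2 (by simpa using hnodup2), h1]
  have htail : names2.map (fun n => ((fun m => m) n, PySem.List.sorted (st.2.getD n []) (fun x => x))) =
      names2.map (fun n => (n, PySem.List.sorted (G.getD n []) (fun x => x))) := by
    apply List.map_congr_left
    intro n hn
    have hg : st.2.getD n [] = G.getD n [] := by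
      rw [PySem.Dict.getD_eq_get?_getD, h2 n (hmem2 n hn), ← PySem.Dict.getD_eq_get?_getD]
    rw [hg]
  rw [htail]
  simp only [List.map_map, Function.comp_def, List.filter_map]
  have hpmem : ∀ n, (PySem.Set.ofList (S.map c) : List String).contains n = G.contains n := by
    intro n
    rw [PySem.Dict.contains_eq_decide_mem_keys, hGkeys]
    have hperm : (S.map c).Perm (keys.map c) :=
      (PySem.List.sorted_perm keys (fun x => x) false).map c
    simp [PySem.Set.mem_ofList, hperm.mem_iff]
  have hval : ∀ n, PySem.List.sorted (G.getD n []) (fun x => x) = S.filter (fun k => c k == n) := by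
    intro n
    rw [hGD n, hSdef]
    exact filter_sorted keys _
  rw [show PySem.Dict.empty.items = ([] : List (String × List String)) from rfl,
    List.nil_append]
  have e1 : List.filter (fun n => (PySem.Set.ofList (List.map (fun x => c x) S)).contains n) ewGroupOrder
      = List.filter (fun n => G.contains n) ewGroupOrder :=
    List.filter_congr (fun n _ => hpmem n)
  have e2 : PySem.List.sorted (List.filter (fun n => !ewGroupOrder.contains n)
        (PySem.Set.ofList (List.map (fun x => c x) S))) (fun x => x) = names2 := by
    rw [hn2, hkeys2]
    refine PySem.List.sorted_eq_sorted_of_perm _ _ _ Function.injective_id ?_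
    apply List.Perm.filter
    rw [List.perm_ext_iff_of_nodup (PySem.Set.nodup_ofList _) hGnodup]
    intro a
    rw [hGkeys]
    simp only [PySem.Set.mem_ofList, List.mem_map]
    constructor
    · rintro ⟨x, hx, rfl⟩
      exact ⟨x, (PySem.List.sorted_perm keys (fun y => y) false).mem_iff.mp hx, rfl⟩
    · rintro ⟨x, hx, rfl⟩
      exact ⟨x, (PySem.List.sorted_perm keys (fun y => y) false).mem_iff.mpr hx, rfl⟩
  rw [List.map_append, e1, e2]
  have hmapeq : ∀ (l : List String),
      List.map (fun n => (n, PySem.List.sorted (G.getD n []) (fun x => x))) l =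
        List.map (fun n => (n, List.map (fun x => x) (List.filter (fun x => c x == n) S))) l :=
    fun l => List.map_congr_left (fun n _ => by rw [hval n, List.map_id'])
  rw [hmapeq, hmapeq]

-- ===== VERDICT (by name: the statement is the Claim_ definition above) =====
theorem group_electroweak_correlator_keys_spec : Claim_equal_group_electroweak_correlator_keys := by
  intro keys _
  exact group_electroweak_correlator_keys_spec' keys
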